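-- pv_equiv track=rewrite | github.com/IgorPont/mephi_homework_tasks | sessions_tasks/programming_in_python/session01/task05_almost_palindrome.py | is_almost_palindrome
-- ===== SOURCE A (Python) =====
-- def is_palindrome(s: str) -> bool:
--     """
--     Проверяет, является ли строка палиндромом.
--
--     Аргументы:
--         s (str): исходная строка.
--
--     Возвращает:
--         bool: True, если строка читается одинаково слева направо и справа налево.
--     """
--     return s == s[::-1]
--
-- def is_almost_palindrome(s: str) -> tuple[bool, str]:
--     """
--     Проверяет, является ли строка палиндромом или почти палиндромом.
--
--     Аргументы:
--         s (str): исходная строка.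
--
--     Возвращает:
--         tuple[bool, str]: кортеж (определение и подтверждение) с одним из результатов:
--             - "палиндром"
--             - "почти палиндром"
--             - "не палиндром"
--     """
--     if is_palindrome(s):
--         return True, "палиндром"
--
--     left, right = 0, len(s) - 1
--     while left < right:
--         if s[left] != s[right]:
--             # пробуем удалить символ слева или справа
--             s1 = s[left + 1 : right + 1]
--             s2 = s[left:right]
--             if s1 == s1[::-1] or s2 == s2[::-1]:
--                 return True, "почти палиндром"
--             else:
--                 return False, "не палиндром"
--         left += 1
--         right -= 1
--
--     return False, "не палиндром"
-- ===== SOURCE B (Python) =====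
-- def is_almost_palindrome(s: str) -> tuple[bool, str]:
--     def pal(lo: int, hi: int) -> bool:
--         # is s[lo..hi] (inclusive) a palindrome?
--         while lo < hi:
--             if s[lo] != s[hi]:
--                 return False
--             lo += 1
--             hi -= 1
--         return True
--
--     i, j = 0, len(s) - 1
--     while i < j:
--         if s[i] != s[j]:
--             if pal(i + 1, j) or pal(i, j - 1):
--                 return True, "почти палиндром"
--             return False, "не палиндром"
--         i += 1
--         j -= 1
--     return True, "палиндром"
-- ===== Notes on version B (the rewrite author's own statement) =====
-- stated objective: alternative
-- what changed: Replaced A's separate full-string s==s[::-1] pre-check plus a second mismatch-hunting scan with slice-and-reverse tests by a single two-pointer pass that classifies on the first mismatch using an index-range palindrome helper, allocating no reversed copies or slices.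
import Mathlib
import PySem

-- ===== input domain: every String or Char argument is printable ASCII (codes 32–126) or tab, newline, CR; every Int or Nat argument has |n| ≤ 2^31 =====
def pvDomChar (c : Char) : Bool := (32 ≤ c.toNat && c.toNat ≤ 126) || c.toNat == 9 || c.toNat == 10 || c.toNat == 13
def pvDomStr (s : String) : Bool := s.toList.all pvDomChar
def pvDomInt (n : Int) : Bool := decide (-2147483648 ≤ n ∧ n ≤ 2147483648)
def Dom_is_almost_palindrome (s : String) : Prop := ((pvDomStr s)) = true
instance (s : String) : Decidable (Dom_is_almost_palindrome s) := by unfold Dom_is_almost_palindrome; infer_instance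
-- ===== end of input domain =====

-- B replaces A's full-string reverse pre-check plus a slice-and-reverse mismatch scan by a
-- single two-pointer pass with an index-range palindrome helper (alternative decomposition).

-- ===== PORT A =====
-- the while-loop of A; left/right are Python ints that stay ≥ 0 on every executed path
-- (the loop is only entered when len(s) ≥ 2), so Nat indices are exact; s[left]/s[right]
-- are in range 0 ≤ left < right < len(s) whenever read, so getD never takes its default.
def pvLoopA (cs : List Char) (left right : Nat) : Bool × String :=
  if left < right then
    if cs.getD left ' ' ≠ cs.getD right ' ' then
      let s1 := PySem.List.slice cs (some ((left : Int) + 1)) (some ((right : Int) + 1))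
      let s2 := PySem.List.slice cs (some (left : Int)) (some (right : Int))
      if s1 = s1.reverse ∨ s2 = s2.reverse then (true, "почти палиндром")
      else (false, "не палиндром")
    else pvLoopA cs (left + 1) (right - 1)
  else (false, "не палиндром")
termination_by right - left

def is_almost_palindrome (s : String) : Bool × String :=
  let cs := s.toList
  -- is_palindrome(s): s == s[::-1]
  if cs = cs.reverse then (true, "палиндром")
  else pvLoopA cs 0 (cs.length - 1)

-- ===== PORT B =====
-- pal(lo, hi): is s[lo..hi] (inclusive) a palindrome? indices in range whenever read
def pvRangePal (cs : List Char) (lo hi : Nat) : Bool :=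
  if lo < hi then (cs.getD lo ' ' == cs.getD hi ' ') && pvRangePal cs (lo + 1) (hi - 1)
  else true
termination_by hi - lo

def pvLoopB (cs : List Char) (i j : Nat) : Bool × String :=
  if i < j then
    if cs.getD i ' ' ≠ cs.getD j ' ' then
      if pvRangePal cs (i + 1) j || pvRangePal cs i (j - 1) then (true, "почти палиндром")
      else (false, "не палиндром")
    else pvLoopB cs (i + 1) (j - 1)
  else (true, "палиндром")
termination_by j - i

def is_almost_palindrome_alt (s : String) : Bool × String :=
  pvLoopB s.toList 0 (s.toList.length - 1)

-- ===== PRECONDITION & SPEC =====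
def Spec_is_almost_palindrome (s : String) (out : Bool × String) : Prop := out = is_almost_palindrome_alt s
instance (s : String) (out : Bool × String) : Decidable (Spec_is_almost_palindrome s out) := by unfold Spec_is_almost_palindrome; infer_instance

-- ===== CLAIM (what is proved, stated in full; the proofs are below) =====
def Claim_equal_is_almost_palindrome : Prop := ∀ (s : String), Dom_is_almost_palindrome s → Spec_is_almost_palindrome s (is_almost_palindrome s)

-- ===== LEMMAS AND PROOFS =====

-- the inclusive subrange cs[lo..hi] that pvRangePal inspects
def pvSub (cs : List Char) (lo hi : Nat) : List Char := (cs.drop lo).take (hi + 1 - lo)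

theorem pvSub_decomp (cs : List Char) (lo hi : Nat) (hlt : lo < hi) (hhi : hi < cs.length) :
    pvSub cs lo hi = cs.getD lo ' ' :: (pvSub cs (lo + 1) (hi - 1) ++ [cs.getD hi ' ']) := by
  have hlen : lo < cs.length := by omega
  unfold pvSub
  rw [List.drop_eq_getElem_cons hlen]
  have h1 : hi + 1 - lo = (hi - lo - 1) + 1 + 1 := by omega
  have h2 : hi - 1 + 1 - (lo + 1) = hi - lo - 1 := by omega
  rw [h1, h2, List.take_succ_cons, List.take_add_one, List.getElem?_drop]
  have h3 : lo + 1 + (hi - lo - 1) = hi := by omega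
  rw [h3, List.getElem?_eq_getElem hhi]
  simp [hlen, hhi]

theorem pal_step (a b : Char) (m : List Char) :
    (a :: (m ++ [b]) = (a :: (m ++ [b])).reverse) ↔ (a = b ∧ m = m.reverse) := by
  have hrev : (a :: (m ++ [b])).reverse = b :: (m.reverse ++ [a]) := by simp
  rw [hrev]
  constructor
  · intro h
    injection h with h1 h2
    subst h1
    exact ⟨rfl, List.append_cancel_right h2⟩
  · rintro ⟨rfl, hm⟩
    rw [← hm]

theorem pvRangePal_iff (cs : List Char) (lo hi : Nat) (hhi : hi < cs.length) :
    pvRangePal cs lo hi = true ↔ pvSub cs lo hi = (pvSub cs lo hi).reverse := by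
  by_cases hlt : lo < hi
  · rw [pvRangePal, if_pos hlt, pvSub_decomp cs lo hi hlt hhi, pal_step,
      Bool.and_eq_true, beq_iff_eq, pvRangePal_iff cs (lo + 1) (hi - 1) (by omega)]
  · rw [pvRangePal, if_neg hlt]
    simp only [true_iff]
    rcases Nat.lt_or_ge hi lo with h | h
    · have : pvSub cs lo hi = [] := by unfold pvSub; rw [show hi + 1 - lo = 0 by omega]; rfl
      rw [this]; rfl
    · have heq : lo = hi := by omega
      subst heq
      have hlen : lo < cs.length := hhi
      have : pvSub cs lo lo = [cs[lo]] := by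
        unfold pvSub
        rw [List.drop_eq_getElem_cons hlen, show lo + 1 - lo = 1 by omega]
        rfl
      rw [this]; rfl
termination_by hi - lo

theorem pal_getElem {cs : List Char} (h : cs = cs.reverse) (k : Nat) (hk : k < cs.length) :
    cs[k] = cs[cs.length - 1 - k]'(by omega) := by
  have h1 : cs[k]? = cs.reverse[k]? := by rw [← h]
  rw [List.getElem?_reverse hk, List.getElem?_eq_getElem hk,
    List.getElem?_eq_getElem (show cs.length - 1 - k < cs.length by omega)] at h1
  exact Option.some.inj h1

theorem loopB_pal (cs : List Char) (h : cs = cs.reverse) :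
    ∀ i j, i + j = cs.length - 1 → pvLoopB cs i j = (true, "палиндром") := by
  suffices H : ∀ n i j, j - i = n → i + j = cs.length - 1 →
      pvLoopB cs i j = (true, "палиндром") by
    intro i j hij; exact H _ i j rfl hij
  intro n
  induction n using Nat.strong_induction_on with
  | _ n IH =>
    intro i j hn hij
    rw [pvLoopB]
    by_cases hlt : i < j
    · have hjlen : j < cs.length := by omega
      have hilen : i < cs.length := by omega
      have heq : cs.getD i ' ' = cs.getD j ' ' := by
        rw [List.getD_eq_getElem cs ' ' hilen, List.getD_eq_getElem cs ' ' hjlen]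
        have := pal_getElem h i hilen
        rw [this]
        congr 1
        omega
      rw [if_pos hlt, if_neg (by simpa using heq)]
      exact IH (j - 1 - (i + 1)) (by omega) (i + 1) (j - 1) rfl (by omega)
    · rw [if_neg hlt]

theorem loopA_eq_loopB (cs : List Char) (hnp : cs ≠ cs.reverse) :
    ∀ i j, i + j = cs.length - 1 → j < cs.length →
      (∀ k, k < i → cs.getD k ' ' = cs.getD (cs.length - 1 - k) ' ') →
      pvLoopA cs i j = pvLoopB cs i j := by
  suffices H : ∀ n i j, j - i = n → i + j = cs.length - 1 → j < cs.length →
      (∀ k, k < i → cs.getD k ' ' = cs.getD (cs.length - 1 - k) ' ') →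
      pvLoopA cs i j = pvLoopB cs i j by
    intro i j h1 h2 h3; exact H _ i j rfl h1 h2 h3
  intro n
  induction n using Nat.strong_induction_on with
  | _ n IH =>
    intro i j hn hij hjlen hmatch
    rw [pvLoopA, pvLoopB]
    by_cases hlt : i < j
    · have hilen : i < cs.length := by omega
      rw [if_pos hlt, if_pos hlt]
      by_cases hne : cs.getD i ' ' ≠ cs.getD j ' '
      · rw [if_pos hne, if_pos hne]
        have hs1 : PySem.List.slice cs (some ((i : Int) + 1)) (some ((j : Int) + 1))
            = pvSub cs (i + 1) j := by
          rw [show ((i : Int) + 1) = ((i + 1 : Nat) : Int) by push_cast; ring,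
            show ((j : Int) + 1) = ((j + 1 : Nat) : Int) by push_cast; ring,
            PySem.List.slice_natCast]
          rfl
        have hs2 : PySem.List.slice cs (some (i : Int)) (some (j : Int))
            = pvSub cs i (j - 1) := by
          rw [PySem.List.slice_natCast]
          unfold pvSub
          congr 1
          omega
        apply if_congr _ rfl rfl
        rw [hs1, hs2, Bool.or_eq_true, pvRangePal_iff cs (i + 1) j hjlen,
          pvRangePal_iff cs i (j - 1) (by omega)]
      · rw [if_neg hne, if_neg hne]
        push Not at hne
        refine IH (j - 1 - (i + 1)) (by omega) (i + 1) (j - 1) rfl (by omega) (by omega) ?_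
        intro k hk
        rcases Nat.lt_or_ge k i with h | h
        · exact hmatch k h
        · have hki : k = i := by omega
          subst hki
          rw [show cs.length - 1 - k = j by omega]
          exact hne
    · exfalso
      apply hnp
      have hlen : cs.length = cs.reverse.length := by simp
      apply List.ext_getElem hlen
      intro k hk1 hk2
      rw [List.getElem_reverse]
      have key : ∀ m, ∀ hm : m < cs.length, m < i → cs[m]'hm = cs[cs.length - 1 - m]'(by omega) := by
        intro m hm him
        have := hmatch m him
        rwa [List.getD_eq_getElem cs ' ' hm,
          List.getD_eq_getElem cs ' ' (show cs.length - 1 - m < cs.length by omega)] at this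
      rcases Nat.lt_or_ge k i with h | h
      · exact key k hk1 h
      · rcases Nat.lt_or_ge (cs.length - 1 - k) i with h2 | h2
        · have := key (cs.length - 1 - k) (by omega) h2
          have hidx : cs.length - 1 - (cs.length - 1 - k) = k := by omega
          simp only [hidx] at this
          exact this.symm
        · congr 1
          omega

-- ===== VERDICT (by name: the statement is the Claim_ definition above) =====
theorem is_almost_palindrome_spec : Claim_equal_is_almost_palindrome := by
  intro s _
  unfold Spec_is_almost_palindrome is_almost_palindrome is_almost_palindrome_alt
  by_cases hpal : s.toList = s.toList.reverse
  · simp only [if_pos hpal]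
    exact (loopB_pal s.toList hpal 0 (s.toList.length - 1) (by omega)).symm
  · simp only [if_neg hpal]
    have hne : s.toList ≠ [] := by
      intro h; apply hpal; rw [h]; rfl
    have hlen : 0 < s.toList.length := List.length_pos_iff.mpr hne
    exact loopA_eq_loopB s.toList hpal 0 (s.toList.length - 1) (by omega) (by omega)
      (fun k hk => absurd hk (by omega))
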